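-- pv_equiv track=rewrite | github.com/pypi-data/pypi-mirror-274 | packages/lightworks/lightworks-1.3.0.tar.gz/lightworks-1.3.0/lightworks/sdk/utils/state_utils.py | _fermionic_basis
-- ===== SOURCE A (Python) =====
-- def _fermionic_basis(N: int, n: int) -> list:
--     """This returns the possible states of n fermions in N modes as vectors."""
--     if n == 0:
--         return [[0]*N]
--     if N == n:
--         return [[1]*N]
--     arrays_with_zero = [[0]+arr for arr in _fermionic_basis(N - 1, n)]
--     arrays_with_one = [[1]+arr for arr in _fermionic_basis(N - 1, n - 1)]
--     return arrays_with_zero + arrays_with_one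
-- ===== SOURCE B (Python) =====
-- def _fermionic_basis(N: int, n: int) -> list:
--     """This returns the possible states of n fermions in N modes as vectors."""
--     if n == 0:
--         return [[0] * N]
--     if n == N:
--         return [[1] * N]
--     out = []
--     # place the first 1 at position i (later positions first: ascending lexicographic order)
--     for i in range(N - n, -1, -1):
--         for tail in _fermionic_basis(N - i - 1, n - 1):
--             out.append([0] * i + [1] + tail)
--     return out
-- ===== Notes on version B (the rewrite author's own statement) =====
-- stated objective: alternative
-- what changed: Replaced A's branch-on-first-bit binary recursion (two recursive calls on N-1, prepending 0 or 1) with enumeration by the position of the first 1: one loop over that position with a single recursion on n-1 for the tail.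
import Mathlib
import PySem

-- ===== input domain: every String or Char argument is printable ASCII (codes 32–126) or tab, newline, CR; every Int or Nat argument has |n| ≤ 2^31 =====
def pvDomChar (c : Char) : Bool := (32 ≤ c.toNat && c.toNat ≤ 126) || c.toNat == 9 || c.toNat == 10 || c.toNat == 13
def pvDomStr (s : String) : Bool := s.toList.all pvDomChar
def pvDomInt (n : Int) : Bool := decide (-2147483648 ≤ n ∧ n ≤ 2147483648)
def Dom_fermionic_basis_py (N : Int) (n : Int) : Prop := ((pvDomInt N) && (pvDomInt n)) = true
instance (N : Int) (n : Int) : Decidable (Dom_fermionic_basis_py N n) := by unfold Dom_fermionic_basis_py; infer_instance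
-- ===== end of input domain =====

-- B enumerates states by the position of the first 1 (one loop over that position,
-- recursing only on n-1) instead of A's two-way branch recursion on N; an alternative
-- decomposition of the same cost, return values proved equal on Pre_.


-- ===== PORT A =====
def fermionic_basis_py (N : Int) (n : Int) : List (List Int) :=
  if n = 0 then [List.replicate N.toNat 0]
  else if N = n then [List.replicate N.toNat 1]
  else if N ≤ 0 then []  -- totality guard only: Python recurses without a base case here (RecursionError); outside Pre_
  else (fermionic_basis_py (N - 1) n).map (fun arr => 0 :: arr) ++
       (fermionic_basis_py (N - 1) (n - 1)).map (fun arr => 1 :: arr)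
termination_by N.toNat
decreasing_by all_goals omega

-- ===== PORT B =====
def fermionic_basis_py_alt (N : Int) (n : Int) : List (List Int) :=
  if n = 0 then [List.replicate N.toNat 0]
  else if n = N then [List.replicate N.toNat 1]
  else if n < 0 then []  -- totality guard only: Python recurses without a base case here (RecursionError); outside Pre_
  else (PySem.List.pyRange (N - n) (-1) (-1)).foldl
      (fun out i =>
        (fermionic_basis_py_alt (N - i - 1) (n - 1)).foldl
          (fun out2 tail => out2 ++ [List.replicate i.toNat 0 ++ 1 :: tail]) out) []
termination_by n.toNat
decreasing_by all_goals omega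

-- ===== PRECONDITION & SPEC =====
-- Pre_ is exactly where A returns: on every other input (n < 0 with n ≠ N, or n > N with
-- n ≠ 0) A's recursion has no base case and raises RecursionError.
def Pre_fermionic_basis_py (N : Int) (n : Int) : Prop := n = 0 ∨ n = N ∨ (0 < n ∧ n ≤ N)
instance (N : Int) (n : Int) : Decidable (Pre_fermionic_basis_py N n) := by unfold Pre_fermionic_basis_py; infer_instance
def pvWitness_fermionic_basis_py : Int × Int := (4, 2)

def Spec_fermionic_basis_py (N : Int) (n : Int) (out : List (List Int)) : Prop := out = fermionic_basis_py_alt N n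
instance (N : Int) (n : Int) (out : List (List Int)) : Decidable (Spec_fermionic_basis_py N n out) := by unfold Spec_fermionic_basis_py; infer_instance

-- ===== CLAIM (what is proved, stated in full; the proofs are below) =====
def Claim_equal_fermionic_basis_py : Prop := ∀ (N : Int) (n : Int), Dom_fermionic_basis_py N n → Pre_fermionic_basis_py N n → Spec_fermionic_basis_py N n (fermionic_basis_py N n)

-- ===== LEMMAS AND PROOFS =====

-- Lexicographic enumeration of length-m 0/1 vectors with exactly k ones (the common value).
def pvE : Nat → Int → List (List Int)
  | 0, k => if k = 0 then [[]] else []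
  | m+1, k => (pvE m k).map (fun a => 0 :: a) ++ (pvE m (k-1)).map (fun a => 1 :: a)

lemma pvE_nil : ∀ (m : Nat) (k : Int), (k < 0 ∨ (m : Int) < k) → pvE m k = [] := by
  intro m
  induction m with
  | zero => intro k hk; simp [pvE]; omega
  | succ m ih =>
    intro k hk
    simp [pvE, ih k (by omega), ih (k-1) (by omega)]

lemma pvE_zero (m : Nat) : pvE m 0 = [List.replicate m 0] := by
  induction m with
  | zero => simp [pvE]
  | succ m ih => simp [pvE, ih, pvE_nil m (-1) (by omega), List.replicate_succ]

lemma pvE_full (m : Nat) : pvE m (m : Int) = [List.replicate m 1] := by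
  induction m with
  | zero => simp [pvE]
  | succ m ih =>
    have h1 : ((m : Int) + 1) - 1 = (m : Int) := by omega
    simp [pvE, pvE_nil m ((m : Int) + 1) (by omega), h1, ih, List.replicate_succ]

lemma A_eq_E : ∀ (m : Nat) (N n : Int), N.toNat = m → (n = 0 ∨ (0 < n ∧ n ≤ N)) →
    fermionic_basis_py N n = pvE m n := by
  intro m
  induction m using Nat.strong_induction_on with
  | _ m ih =>
    intro N n hm hpre
    rw [fermionic_basis_py]
    by_cases h0 : n = 0
    · subst h0; rw [if_pos rfl, hm, pvE_zero]
    · rw [if_neg h0]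
      have hn : 0 < n ∧ n ≤ N := by rcases hpre with h | h; exact absurd h h0; exact h
      by_cases hNn : N = n
      · rw [if_pos hNn, hm]
        have : n = (m : Int) := by omega
        rw [this, pvE_full]
      · rw [if_neg hNn, if_neg (by omega)]
        have hmpos : 0 < m := by omega
        obtain ⟨m', rfl⟩ : ∃ m', m = m' + 1 := ⟨m - 1, by omega⟩
        have hm' : (N - 1).toNat = m' := by omega
        rw [ih m' (by omega) (N-1) n hm' (Or.inr (by omega)),
            ih m' (by omega) (N-1) (n-1) hm' (by omega)]
        rfl

-- Python's range(m-k, -1, -1), consumed by flatMap, re-indexed over Nat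
lemma pyRange_desc_flatMap (j : Nat) (g : Int → List (List Int)) :
    (PySem.List.pyRange (j : Int) (-1) (-1)).flatMap g
      = ((List.range (j + 1)).reverse).flatMap (fun (i : Nat) => g (i : Int)) := by
  induction j with
  | zero =>
    rw [PySem.List.pyRange_neg_one_cons (by omega), PySem.List.pyRange_neg_one_eq_nil (by omega)]
    simp
  | succ j ih =>
    rw [show ((j + 1 : Nat) : Int) = (j : Int) + 1 by push_cast; ring,
        PySem.List.pyRange_neg_one_cons (by omega)]
    simp only [add_sub_cancel_right, List.flatMap_cons, ih,
      List.range_succ (n := j + 1), List.reverse_append]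
    simp

lemma reverse_range_succ (j : Nat) :
    (List.range (j + 1)).reverse = ((List.range j).reverse).map (fun i => i + 1) ++ [0] := by
  rw [List.range_succ_eq_map]
  simp

lemma flatMap_map_succ (l : List Nat) (g : Nat → List (List Int)) :
    (l.map (fun i => i + 1)).flatMap g = l.flatMap (fun i => g (i + 1)) := by
  induction l with
  | nil => rfl
  | cons x l ih => simp [ih]

-- the enumeration pvE, regrouped by the position of the first 1
lemma pvE_first_one : ∀ (m k : Nat), 0 < k → k ≤ m →
    pvE m (k : Int) = ((List.range (m - k + 1)).reverse).flatMap
      (fun i => (pvE (m - i - 1) ((k : Int) - 1)).map (fun t => List.replicate i 0 ++ 1 :: t)) := by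
  intro m
  induction m with
  | zero => intro k hk hkm; omega
  | succ m ih =>
    intro k hk hkm
    by_cases hkm' : k ≤ m
    · have hrw : m + 1 - k + 1 = (m - k + 1) + 1 := by omega
      rw [hrw, reverse_range_succ, List.flatMap_append]
      show pvE (m + 1) (k : Int) = _
      rw [show pvE (m + 1) (k : Int)
            = (pvE m (k : Int)).map (fun a => 0 :: a) ++ (pvE m ((k : Int) - 1)).map (fun a => 1 :: a)
          from rfl]
      rw [ih k hk hkm', List.map_flatMap, flatMap_map_succ]
      congr 1
      · refine List.flatMap_congr (fun i hi => ?_)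
        simp [List.map_map, Function.comp_def, List.replicate_succ]
      · simp
    · have hk' : k = m + 1 := by omega
      subst hk'
      have h0 : m + 1 - (m + 1) + 1 = 1 := by omega
      rw [h0]
      have h1 : ((m + 1 : Nat) : Int) - 1 = (m : Int) := by push_cast; ring
      have h2 : m + 1 - 0 - 1 = m := by omega
      simp only [List.range_one, List.reverse_singleton, List.flatMap_singleton, h1, h2]
      rw [pvE_full (m + 1), pvE_full m]
      simp [List.replicate_succ]

lemma B_eq_E : ∀ (g : Nat) (N n : Int), n.toNat = g → (n = 0 ∨ (0 < n ∧ n ≤ N)) →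
    fermionic_basis_py_alt N n = pvE N.toNat n := by
  intro g
  induction g using Nat.strong_induction_on with
  | _ g ih =>
    intro N n hg hpre
    rw [fermionic_basis_py_alt]
    by_cases h0 : n = 0
    · subst h0; rw [if_pos rfl, pvE_zero]
    · have hn : 0 < n ∧ n ≤ N := by rcases hpre with h | h; exact absurd h h0; exact h
      rw [if_neg h0]
      by_cases hNn0 : n = N
      · rw [if_pos hNn0]
        have : n = (N.toNat : Int) := by omega
        rw [this, pvE_full]
      rw [if_neg hNn0, if_neg (by omega)]
      have hNn : N - n = ((N - n).toNat : Int) := by omega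
      rw [hNn]
      have hfold : ∀ (l : List Int) (acc : List (List Int)),
          l.foldl (fun out i =>
            (fermionic_basis_py_alt (N - i - 1) (n - 1)).foldl
              (fun out2 tail => out2 ++ [List.replicate i.toNat 0 ++ 1 :: tail]) out) acc
          = acc ++ l.flatMap (fun i =>
              (fermionic_basis_py_alt (N - i - 1) (n - 1)).map
                (fun tail => List.replicate i.toNat 0 ++ 1 :: tail)) := by
        intro l
        induction l with
        | nil => intro acc; simp
        | cons x l ihl =>
          intro acc
          rw [List.foldl_cons, ihl]
          simp only [List.flatMap_cons, PySem.List.foldl_append_singleton_eq_map,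
            List.append_assoc]
      rw [hfold, List.nil_append, pyRange_desc_flatMap]
      have hm : N.toNat - n.toNat = (N - n).toNat := by omega
      rw [show pvE N.toNat n = pvE N.toNat ((n.toNat : Nat) : Int) by rw [show ((n.toNat : Nat) : Int) = n by omega],
          pvE_first_one N.toNat n.toNat (by omega) (by omega), hm]
      refine List.flatMap_congr (fun i hi => ?_)
      have hi' : i < (N - n).toNat + 1 := by
        have := List.mem_range.mp (List.mem_reverse.mp hi); omega
      have hrec : fermionic_basis_py_alt (N - (i : Int) - 1) (n - 1) = pvE (N - (i : Int) - 1).toNat (n - 1) := by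
        refine ih (n - 1).toNat (by omega) _ _ rfl (by omega)
      rw [hrec,
          show (N - (i : Int) - 1).toNat = N.toNat - i - 1 by omega,
          show ((n.toNat : Nat) : Int) - 1 = n - 1 by omega,
          show ((i : Int)).toNat = i by omega]

theorem fermionic_basis_py_spec : Claim_equal_fermionic_basis_py := by
  intro N n _ hpre
  unfold Spec_fermionic_basis_py
  by_cases h0 : n = 0
  · subst h0
    rw [fermionic_basis_py, fermionic_basis_py_alt]
    simp
  · by_cases hNn : n = N
    · subst hNn
      rw [fermionic_basis_py, fermionic_basis_py_alt]
      simp [h0]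
    · have hp : n = 0 ∨ (0 < n ∧ n ≤ N) := by
        rcases hpre with h | h | h
        · exact Or.inl h
        · exact absurd h hNn
        · exact Or.inr h
      rw [A_eq_E N.toNat N n rfl hp, B_eq_E n.toNat N n rfl hp]
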